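-- pv_equiv track=rewrite | github.com/BufferFis/Transformer_from_Scratch | complete_model.py | _strip_special
-- ===== SOURCE A (Python) =====
-- from typing import List, Tuple
--
-- def _strip_special(ids: List[int], sos_id: int, eos_id: int, pad_id: int) -> List[int]:
--     out = []
--     for t in ids:
--         if t in (sos_id, pad_id):
--             continue
--         if t == eos_id:
--             break
--         out.append(t)
--     return out
-- ===== SOURCE B (Python) =====
-- def _strip_special(ids, sos_id, eos_id, pad_id):
--     kept = [t for t in ids if t != sos_id and t != pad_id]
--     if eos_id in kept:
--         kept = kept[:kept.index(eos_id)]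
--     return kept
-- ===== Notes on version B (the rewrite author's own statement) =====
-- stated objective: simpler
-- what changed: Replaces the single streaming loop with continue/break by two declarative passes: a comprehension filtering out sos/pad, then truncation at the first eos via in/index.
import Mathlib
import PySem

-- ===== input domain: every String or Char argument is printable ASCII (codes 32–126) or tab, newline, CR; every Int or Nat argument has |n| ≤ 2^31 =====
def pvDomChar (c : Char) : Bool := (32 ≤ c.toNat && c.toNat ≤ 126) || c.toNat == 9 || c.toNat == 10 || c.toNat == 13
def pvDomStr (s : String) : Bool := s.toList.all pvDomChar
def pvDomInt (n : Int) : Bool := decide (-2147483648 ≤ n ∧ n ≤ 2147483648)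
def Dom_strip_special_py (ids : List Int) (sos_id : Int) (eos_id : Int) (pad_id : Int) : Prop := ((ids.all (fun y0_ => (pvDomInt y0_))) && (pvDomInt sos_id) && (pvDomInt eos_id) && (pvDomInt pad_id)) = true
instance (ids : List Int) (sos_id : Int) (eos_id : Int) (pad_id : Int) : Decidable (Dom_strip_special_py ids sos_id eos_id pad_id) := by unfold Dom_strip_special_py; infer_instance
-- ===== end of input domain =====

-- B replaces A's single streaming loop (continue/break) by two declarative passes:
-- filter out sos/pad, then truncate at the first eos; objective: simpler. Proved equal on all inputs.


-- ===== PORT A =====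
-- A's loop: accumulator `out`, `continue` on sos/pad, `break` on eos, else append.
def stripSpecialLoopA (sos_id : Int) (eos_id : Int) (pad_id : Int) (acc : List Int) : List Int → List Int
  | [] => acc
  | t :: rest =>
    if t = sos_id ∨ t = pad_id then stripSpecialLoopA sos_id eos_id pad_id acc rest
    else if t = eos_id then acc
    else stripSpecialLoopA sos_id eos_id pad_id (acc ++ [t]) rest

def strip_special_py (ids : List Int) (sos_id : Int) (eos_id : Int) (pad_id : Int) : List Int :=
  stripSpecialLoopA sos_id eos_id pad_id [] ids

-- ===== PORT B =====
-- Source B's truncation step: `if eos_id in kept: kept = kept[:kept.index(eos_id)]`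
def stripSpecialTrunc (eos_id : Int) (kept : List Int) : List Int :=
  if eos_id ∈ kept then
    match PySem.List.index? kept eos_id with
    | some i => kept.take i
    | none => kept
  else kept

def strip_special_py_alt (ids : List Int) (sos_id : Int) (eos_id : Int) (pad_id : Int) : List Int :=
  stripSpecialTrunc eos_id (ids.filter (fun t => t != sos_id && t != pad_id))

-- ===== PRECONDITION & SPEC =====
def Spec_strip_special_py (ids : List Int) (sos_id : Int) (eos_id : Int) (pad_id : Int) (out : List Int) : Prop := out = strip_special_py_alt ids sos_id eos_id pad_id
instance (ids : List Int) (sos_id : Int) (eos_id : Int) (pad_id : Int) (out : List Int) : Decidable (Spec_strip_special_py ids sos_id eos_id pad_id out) := by unfold Spec_strip_special_py; infer_instance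

-- ===== CLAIM (what is proved, stated in full; the proofs are below) =====
def Claim_equal_strip_special_py : Prop := ∀ (ids : List Int) (sos_id : Int) (eos_id : Int) (pad_id : Int), Dom_strip_special_py ids sos_id eos_id pad_id → Spec_strip_special_py ids sos_id eos_id pad_id (strip_special_py ids sos_id eos_id pad_id)

-- ===== LEMMAS AND PROOFS =====

theorem stripSpecialTrunc_cons_self (eos_id : Int) (l : List Int) :
    stripSpecialTrunc eos_id (eos_id :: l) = [] := by
  unfold stripSpecialTrunc
  rw [PySem.List.index?_cons_self]
  simp

theorem stripSpecialTrunc_cons_ne (eos_id t : Int) (l : List Int) (h : t ≠ eos_id) :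
    stripSpecialTrunc eos_id (t :: l) = t :: stripSpecialTrunc eos_id l := by
  by_cases hm : eos_id ∈ l
  · obtain ⟨i, hi⟩ := (PySem.List.index?_isSome_iff l eos_id).2 hm |> Option.isSome_iff_exists.mp
    unfold stripSpecialTrunc
    rw [PySem.List.index?_cons_of_ne l h, hi]
    simp [hm, h.symm, List.take_succ_cons]
  · have : eos_id ∉ t :: l := by simp [h.symm, hm]
    simp [stripSpecialTrunc, this, hm]

theorem stripSpecialLoopA_eq (sos_id eos_id pad_id : Int) (ids acc : List Int) :
    stripSpecialLoopA sos_id eos_id pad_id acc ids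
      = acc ++ stripSpecialTrunc eos_id (ids.filter (fun t => t != sos_id && t != pad_id)) := by
  induction ids generalizing acc with
  | nil => simp [stripSpecialLoopA, stripSpecialTrunc]
  | cons t rest ih =>
    by_cases hsp : t = sos_id ∨ t = pad_id
    · have hf : (t != sos_id && t != pad_id) = false := by
        rcases hsp with h | h <;> simp [h]
      simp [stripSpecialLoopA, hsp, hf, ih]
    · have hf : (t != sos_id && t != pad_id) = true := by
        rw [not_or] at hsp; simp [hsp.1, hsp.2]
      by_cases he : t = eos_id
      · subst he
        simp [stripSpecialLoopA, hsp, hf, stripSpecialTrunc_cons_self]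
      · simp [stripSpecialLoopA, hsp, he, hf, ih, stripSpecialTrunc_cons_ne _ _ _ he]

-- ===== VERDICT (by name: the statement is the Claim_ definition above) =====
theorem strip_special_py_spec : Claim_equal_strip_special_py := by
  intro ids sos_id eos_id pad_id _
  show strip_special_py ids sos_id eos_id pad_id = strip_special_py_alt ids sos_id eos_id pad_id
  simp [strip_special_py, strip_special_py_alt, stripSpecialLoopA_eq]
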